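-- pv_equiv track=rewrite | github.com/OlegVukadinov/SoftUni-Fundamentals-with-Python-September-2023 | Fundamentals with Python - Sept 2023/12 Lists Basics - More Exercise/6_list_manipulator.py | find_max_even_odd
-- ===== SOURCE A (Python) =====
-- def find_max_even_odd(lst, command):
--     is_even = command == "max even"
--     filter_func = lambda x: x % 2 == 0 if is_even else x % 2 != 0
--     max_element = None
--     max_index = -1
--     for i in range(len(lst)):
--         if filter_func(lst[i]):
--             if max_element is None or lst[i] >= max_element:
--                 max_element = lst[i]
--                 max_index = i
--     return max_index
-- ===== SOURCE B (Python) =====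
-- def find_max_even_odd(lst, command):
--     want = 0 if command == "max even" else 1
--     pairs = sorted((v, i) for i, v in enumerate(lst) if v % 2 == want)
--     return pairs[-1][1] if pairs else -1
-- ===== Notes on version B (the rewrite author's own statement) =====
-- stated objective: alternative
-- what changed: B replaces A's single-pass running-maximum scan with state (max_element, max_index) by a sort-based algorithm: build the (value, index) pairs of the required parity, sort them (Python tuple order), and return the index component of the last pair; the lexicographic order reproduces A's >=/last-occurrence tie-breaking.
import Mathlib
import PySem

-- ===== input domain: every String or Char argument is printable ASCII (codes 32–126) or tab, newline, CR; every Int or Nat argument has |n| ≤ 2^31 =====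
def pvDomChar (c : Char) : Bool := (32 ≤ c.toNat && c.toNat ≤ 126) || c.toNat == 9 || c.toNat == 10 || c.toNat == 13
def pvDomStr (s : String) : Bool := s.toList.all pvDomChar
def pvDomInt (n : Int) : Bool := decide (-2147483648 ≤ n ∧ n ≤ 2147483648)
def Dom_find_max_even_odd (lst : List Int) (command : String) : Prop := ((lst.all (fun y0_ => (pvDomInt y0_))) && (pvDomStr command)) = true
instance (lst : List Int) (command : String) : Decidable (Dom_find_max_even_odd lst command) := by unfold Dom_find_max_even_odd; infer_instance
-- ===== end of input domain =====

-- B replaces A's single-pass running-maximum scan by sort-then-take-last: sort the (value, index) pairs of the required parity and return the last pair's index; a different algorithm of the same purpose (not faster).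


-- ===== PORT A =====
def find_max_even_odd (lst : List Int) (command : String) : Int :=
  let is_even := command == "max even"
  let filter_func : Int → Bool := fun x =>
    if is_even then PySem.Int.mod x 2 == 0 else PySem.Int.mod x 2 != 0
  -- for i in range(len(lst)): ...  (lst[i] as lst.getD i 0 — i < len lst, so exact)
  let st := (List.range lst.length).foldl
    (fun (st : Option Int × Int) (i : Nat) =>
      let x := lst.getD i 0
      if filter_func x then
        match st.1 with
        | none => (some x, (i : Int))
        | some m => if x ≥ m then (some x, (i : Int)) else st
      else st)
    (none, -1)
  st.2

-- ===== PORT B =====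
def find_max_even_odd_alt (lst : List Int) (command : String) : Int :=
  let want : Int := if command == "max even" then 0 else 1
  -- sorted((v, i) for i, v in enumerate(lst) if v % 2 == want)  — Python tuple sort = sorted2 on the two components
  let pairs := PySem.List.sorted2
    ((PySem.List.enumerate lst).filterMap
      (fun p => if PySem.Int.mod p.2 2 == want then some (p.2, p.1) else none))
    (fun p => p.1) (fun p => p.2)
  -- pairs[-1][1] if pairs else -1
  match pairs.getLast? with
  | some p => p.2
  | none => -1

-- ===== PRECONDITION & SPEC =====
def Spec_find_max_even_odd (lst : List Int) (command : String) (out : Int) : Prop := out = find_max_even_odd_alt lst command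
instance (lst : List Int) (command : String) (out : Int) : Decidable (Spec_find_max_even_odd lst command out) := by unfold Spec_find_max_even_odd; infer_instance

-- ===== CLAIM (what is proved, stated in full; the proofs are below) =====
def Claim_equal_find_max_even_odd : Prop := ∀ (lst : List Int) (command : String), Dom_find_max_even_odd lst command → Spec_find_max_even_odd lst command (find_max_even_odd lst command)

-- ===== LEMMAS AND PROOFS =====

-- Python's tuple order on (value, index) pairs
def pvLexLe (p q : Int × Int) : Prop := p.1 < q.1 ∨ (p.1 = q.1 ∧ p.2 ≤ q.2)

-- the Bool comparator sorted2 builds from the two projections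
def pvLt (p q : Int × Int) : Bool :=
  decide (p.1 < q.1) || (!decide (q.1 < p.1) && decide (p.2 < q.2))

theorem pvLexLe_refl (p : Int × Int) : pvLexLe p p := by
  unfold pvLexLe; omega

theorem pvLexLe_trans {p q r : Int × Int} (h1 : pvLexLe p q) (h2 : pvLexLe q r) : pvLexLe p r := by
  unfold pvLexLe at *; omega

theorem pvLexLe_antisymm {p q : Int × Int} (h1 : pvLexLe p q) (h2 : pvLexLe q p) : p = q := by
  unfold pvLexLe at *
  have : p.1 = q.1 ∧ p.2 = q.2 := by omega
  exact Prod.ext this.1 this.2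

theorem pvLt_false {p q : Int × Int} (h : pvLt p q = false) : pvLexLe q p := by
  unfold pvLt at h; unfold pvLexLe
  simp only [Bool.or_eq_false_iff, Bool.and_eq_false_iff, decide_eq_false_iff_not,
    Bool.not_eq_false', decide_eq_true_eq] at h
  omega

theorem pvLt_true {p q : Int × Int} (h : pvLt p q = true) : pvLexLe p q := by
  unfold pvLt at h; unfold pvLexLe
  simp only [Bool.or_eq_true, Bool.and_eq_true, decide_eq_true_eq,
    Bool.not_eq_true', decide_eq_false_iff_not] at h
  omega

-- inserting with sorted2's comparator keeps the list lex-nondecreasing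
theorem pv_insert_pairwise (x : Int × Int) (ys : List (Int × Int))
    (h : ys.Pairwise pvLexLe) :
    (PySem.List.insertBy pvLt x ys).Pairwise pvLexLe := by
  induction ys with
  | nil => simp [PySem.List.insertBy]
  | cons y ys ih =>
    rw [List.pairwise_cons] at h
    by_cases hb : pvLt x y = true
    · simp only [PySem.List.insertBy, hb, if_pos]
      refine List.pairwise_cons.2 ⟨?_, List.pairwise_cons.2 ⟨h.1, h.2⟩⟩
      intro z hz
      rcases List.mem_cons.1 hz with rfl | hz
      · exact pvLt_true hb
      · exact pvLexLe_trans (pvLt_true hb) (h.1 z hz)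
    · have hb' : pvLt x y = false := by simpa using hb
      simp only [PySem.List.insertBy, hb', Bool.false_eq_true, if_neg, not_false_iff]
      refine List.pairwise_cons.2 ⟨?_, ih h.2⟩
      intro z hz
      rcases (PySem.List.insertBy_mem_iff pvLt x z ys).1 hz with rfl | hz
      · exact pvLt_false hb'
      · exact h.1 z hz

theorem pv_foldl_insert_pairwise (ps : List (Int × Int)) :
    ∀ (acc : List (Int × Int)), acc.Pairwise pvLexLe →
    (ps.foldl (fun acc x => PySem.List.insertBy pvLt x acc) acc).Pairwise pvLexLe := by
  induction ps with
  | nil => intro acc h; simpa using h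
  | cons p ps ih =>
    intro acc h
    exact ih _ (pv_insert_pairwise p acc h)

theorem pv_sorted2_pairwise (ps : List (Int × Int)) :
    (PySem.List.sorted2 ps (fun p => p.1) (fun p => p.2) false).Pairwise pvLexLe := by
  have : PySem.List.sorted2 ps (fun p => p.1) (fun p => p.2) false
      = ps.foldl (fun acc x => PySem.List.insertBy pvLt x acc) [] := by
    simp only [PySem.List.sorted2]
    rfl
  rw [this]
  exact pv_foldl_insert_pairwise ps [] (by simp)

-- in a lex-nondecreasing list the last element dominates every element
theorem pv_getLast_max (s : List (Int × Int)) (h : s ≠ []) (hp : s.Pairwise pvLexLe) :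
    ∀ q ∈ s, pvLexLe q (s.getLast h) := by
  induction s with
  | nil => exact absurd rfl h
  | cons a s ih =>
    rw [List.pairwise_cons] at hp
    intro q hq
    rcases List.mem_cons.1 hq with rfl | hq
    · cases s with
      | nil => simpa [List.getLast] using pvLexLe_refl q
      | cons b t =>
        rw [List.getLast_cons (by simp)]
        exact hp.1 _ (List.getLast_mem _)
    · have hs : s ≠ [] := List.ne_nil_of_mem hq
      rw [List.getLast_cons hs]
      exact ih hs hp.2 q hq

-- pairs of all elements with their indices, starting at s (the (v, i) view of enumerate)
def pvAll (xs : List Int) (s : Int) : List (Int × Int) :=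
  match xs with
  | [] => []
  | x :: t => (x, s) :: pvAll t (s + 1)

theorem pv_enum_filterMap (q : Int → Bool) : ∀ (xs : List Int) (s : Int),
    (PySem.List.enumerate xs s).filterMap
      (fun p => if q p.2 then some (p.2, p.1) else none)
    = (pvAll xs s).filter (fun p => q p.1) := by
  intro xs
  induction xs with
  | nil => intro s; simp [PySem.List.enumerate_nil, pvAll]
  | cons x t ih =>
    intro s
    rw [PySem.List.enumerate_cons]
    by_cases h : q x
    · simp [pvAll, h, ih]
    · simp [pvAll, h, ih]

theorem pv_pvAll_eq (xs : List Int) : ∀ (s : Int),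
    pvAll xs s = (List.range xs.length).map (fun k => (xs.getD k 0, s + (k : Int))) := by
  induction xs with
  | nil => intro s; simp [pvAll]
  | cons x t ih =>
    intro s
    simp only [pvAll, List.length_cons, List.range_succ_eq_map, List.map_cons, List.map_map]
    refine congrArg₂ _ (by simp) ?_
    rw [ih (s + 1)]
    refine List.map_congr_left ?_
    intro k _
    simp only [Function.comp, List.getD_cons_succ]
    congr 1
    push_cast
    ring

-- once a candidate with best index b has been found, A's fold tracks the running argmax over the remaining matching indices
theorem pv_fold_some (g : Nat → Int) (q : Nat → Bool) (cs : List Nat) : ∀ (b : Nat),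
    cs.foldl
      (fun (st : Option Int × Int) (i : Nat) =>
        if q i then
          match st.1 with
          | none => (some (g i), (i : Int))
          | some m => if g i ≥ m then (some (g i), (i : Int)) else st
        else st)
      (some (g b), (b : Int))
    = (some (g ((cs.filter q).foldl (fun best i => if g i ≥ g best then i else best) b)),
       (((cs.filter q).foldl (fun best i => if g i ≥ g best then i else best) b : Nat) : Int)) := by
  induction cs with
  | nil => intro b; simp
  | cons i cs ih =>
    intro b
    by_cases h : q i
    · by_cases h2 : g i ≥ g b <;> simp [h, h2, ih]
    · simp [h, ih]

-- from the empty state, A's fold returns -1 when no index matches, else the argmax fold over the matching indices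
theorem pv_fold_none (g : Nat → Int) (q : Nat → Bool) (cs : List Nat) :
    (cs.foldl
      (fun (st : Option Int × Int) (i : Nat) =>
        if q i then
          match st.1 with
          | none => (some (g i), (i : Int))
          | some m => if g i ≥ m then (some (g i), (i : Int)) else st
        else st)
      (none, -1)).2
    = (match cs.filter q with
       | [] => (-1 : Int)
       | c :: cs' => ((cs'.foldl (fun best i => if g i ≥ g best then i else best) c : Nat) : Int)) := by
  induction cs with
  | nil => simp
  | cons i cs ih =>
    by_cases h : q i
    · simp only [List.foldl_cons, List.filter_cons, h, if_pos]
      simpa using congrArg Prod.snd (pv_fold_some g q cs i)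
    · simpa [h] using ih

-- on a strictly increasing index list, A's ≥-argmax fold returns a member whose (value, index) pair lex-dominates all others
theorem pv_argfold (g : Nat → Int) : ∀ (cs : List Nat) (c : Nat),
    (c :: cs).Pairwise (· < ·) →
    (cs.foldl (fun best i => if g i ≥ g best then i else best) c) ∈ (c :: cs) ∧
    ∀ j ∈ c :: cs,
      pvLexLe (g j, (j : Int))
        (g (cs.foldl (fun best i => if g i ≥ g best then i else best) c),
         ((cs.foldl (fun best i => if g i ≥ g best then i else best) c : Nat) : Int)) := by
  intro cs
  induction cs with
  | nil =>
    intro c _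
    exact ⟨List.mem_singleton.2 rfl, by
      intro j hj; rw [List.mem_singleton] at hj; subst hj; exact pvLexLe_refl _⟩
  | cons i cs ih =>
    intro c hp
    rw [List.pairwise_cons] at hp
    have hci : c < i := hp.1 i (List.mem_cons_self)
    have hp2 := hp.2
    rw [List.pairwise_cons] at hp2
    by_cases h : g i ≥ g c
    · -- first step keeps i
      have hrec := ih i (List.pairwise_cons.2 ⟨hp2.1, hp2.2⟩)
      simp only [List.foldl_cons, h, if_pos]
      constructor
      · rcases List.mem_cons.1 hrec.1 with hm | hm
        · exact List.mem_cons.2 (Or.inr (List.mem_cons.2 (Or.inl hm)))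
        · exact List.mem_cons.2 (Or.inr (List.mem_cons.2 (Or.inr hm)))
      · intro j hj
        rcases List.mem_cons.1 hj with rfl | hj
        · -- the dropped c: (g c, c) ≤ (g i, i) ≤ best
          refine pvLexLe_trans ?_ (hrec.2 i (List.mem_cons_self))
          simp only [pvLexLe]
          omega
        · exact hrec.2 j hj
    · -- first step keeps c
      have hcall : ∀ j ∈ cs, c < j := fun j hj => hp.1 j (List.mem_cons.2 (Or.inr hj))
      have hrec := ih c (List.pairwise_cons.2 ⟨hcall, hp2.2⟩)
      simp only [List.foldl_cons, if_neg (by omega : ¬ g i ≥ g c)]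
      constructor
      · rcases List.mem_cons.1 hrec.1 with hm | hm
        · exact List.mem_cons.2 (Or.inl hm)
        · exact List.mem_cons.2 (Or.inr (List.mem_cons.2 (Or.inr hm)))
      · intro j hj
        rcases List.mem_cons.1 hj with rfl | hj
        · exact hrec.2 j (List.mem_cons_self)
        · rcases List.mem_cons.1 hj with rfl | hj
          · -- the dropped i: g i < g c, so (g i, i) < (g c, c) ≤ best
            refine pvLexLe_trans ?_ (hrec.2 c (List.mem_cons_self))
            simp only [pvLexLe]
            omega
          · exact hrec.2 j (List.mem_cons.2 (Or.inr hj))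

-- A's filter_func is the single residue test B uses
theorem pv_filter_eq (is_even : Bool) (x : Int) :
    (if is_even then PySem.Int.mod x 2 == 0 else PySem.Int.mod x 2 != 0)
    = (PySem.Int.mod x 2 == (if is_even then (0 : Int) else 1)) := by
  cases is_even <;> rcases PySem.Int.mod_two_eq x with h | h <;> rw [h] <;> decide

-- ===== VERDICT (by name: the statement is the Claim_ definition above) =====
theorem find_max_even_odd_spec : Claim_equal_find_max_even_odd := by
  intro lst command _
  show find_max_even_odd lst command = find_max_even_odd_alt lst command
  unfold find_max_even_odd find_max_even_odd_alt
  simp only [pv_filter_eq]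
  set want : Int := if (command == "max even") = true then (0 : Int) else 1 with hwant
  set q : Int → Bool := fun x => PySem.Int.mod x 2 == want with hq
  set g : Nat → Int := fun i => lst.getD i 0 with hg
  set q' : Nat → Bool := fun i => q (g i) with hq'
  -- A side: reduce the fold
  rw [pv_fold_none g q' (List.range lst.length)]
  -- B side: the pair list
  rw [pv_enum_filterMap q lst 0, pv_pvAll_eq lst 0]
  have hzero : (List.range lst.length).map (fun k => (g k, (0 : Int) + (k : Int)))
      = (List.range lst.length).map (fun k => (g k, (k : Int))) := by
    refine List.map_congr_left ?_; intro k _; simp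
  rw [hzero, List.filter_map]
  have hcomp : ((fun p : Int × Int => q p.1) ∘ fun k => (g k, (k : Int))) = q' := rfl
  rw [hcomp]
  set cs := (List.range lst.length).filter q' with hcs
  have hcs_pairwise : cs.Pairwise (· < ·) := (List.pairwise_lt_range).filter _
  cases hmatch : cs with
  | nil =>
    rfl
  | cons c cs' =>
    -- A's value: the argmax fold over c :: cs'
    have harg := pv_argfold g cs' c (hmatch ▸ hcs_pairwise)
    set b := cs'.foldl (fun best i => if g i ≥ g best then i else best) c with hb
    -- B's value: last of the sorted pair list
    set ps := ((c :: cs').map (fun k => (g k, (k : Int)))) with hps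
    set s := PySem.List.sorted2 ps (fun p => p.1) (fun p => p.2) false with hs
    have hperm : s.Perm ps := PySem.List.sorted2_perm ps _ _ _
    have hsne : s ≠ [] := by
      intro h0
      have := hperm.length_eq
      rw [h0] at this
      simp [hps] at this
    have hlast : s.getLast? = some (s.getLast hsne) := List.getLast?_eq_some_getLast _
    rw [hlast]
    -- the last of s is the lex max of ps; A's pair is also a lex max of ps
    have hmax := pv_getLast_max s hsne (pv_sorted2_pairwise ps)
    set p := s.getLast hsne with hp
    have hpmem : p ∈ ps := hperm.subset (List.getLast_mem _)
    have hamem : (g b, (b : Int)) ∈ ps := List.mem_map_of_mem harg.1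
    have h1 : pvLexLe (g b, (b : Int)) p := hmax _ (hperm.mem_iff.2 hamem)
    have h2 : pvLexLe p (g b, (b : Int)) := by
      rcases List.mem_map.1 hpmem with ⟨j, hj, hjp⟩
      rw [← hjp]
      exact harg.2 j hj
    have := pvLexLe_antisymm h1 h2
    rw [← this]
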